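-- pv_equiv track=rewrite | github.com/Samantha-norrie/qnotation-web-app | quantum_library_parsers/parser_utils.py | insert_main_function_into_code_string
-- ===== SOURCE A (Python) =====
-- def insert_main_function_into_code_string(start_main_after: str, code_string: str, output_string: str) -> str:
--     """
--     Adds a main function and its call to the given code string.
--
--     Args:
--         start_main_after (str): line to insert the main header after
--         code_string (str): code where the main function should be inserted into
--         output_string (str): code responsible for printing out circuit information
--
--     Returns:
--         str: modified code string
--     """
--     code_lines = code_string.split("\n")
--     code_string_formatted = ""
--     end_of_imports_found = False
--
--     for i in range(0, len(code_lines)):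
--         if not end_of_imports_found and start_main_after in code_lines[i]:
--             code_string_formatted = (
--                 code_string_formatted + code_lines[i] + "\ndef main():\n"
--             )
--             end_of_imports_found = True
--         elif end_of_imports_found:
--             code_string_formatted = code_string_formatted + "    "+ code_lines[i] + "\n"
--         else:
--             code_string_formatted = code_string_formatted + code_lines[i] + "\n"\
--
--     code_string_formatted = (
--         code_string_formatted +  output_string + "\nmain()\n"
--     )
--
--     return code_string_formatted
-- ===== SOURCE B (Python) =====
-- def insert_main_function_into_code_string(start_main_after: str, code_string: str, output_string: str) -> str:
--     lines = code_string.split("\n")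
--     idx = next((i for i, l in enumerate(lines) if start_main_after in l), None)
--     if idx is None:
--         body = "\n".join(lines) + "\n"
--     else:
--         body = ("\n".join(lines[: idx + 1]) + "\ndef main():\n"
--                 + "".join("    " + l + "\n" for l in lines[idx + 1:]))
--     return body + output_string + "\nmain()\n"
-- ===== Notes on version B (the rewrite author's own statement) =====
-- stated objective: simpler
-- what changed: Replaces A's stateful per-line flag loop (three-way branch accumulating a string) with a search-then-slice decomposition: find the first matching line's index, join the prefix, indent-and-join the suffix.
import Mathlib
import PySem

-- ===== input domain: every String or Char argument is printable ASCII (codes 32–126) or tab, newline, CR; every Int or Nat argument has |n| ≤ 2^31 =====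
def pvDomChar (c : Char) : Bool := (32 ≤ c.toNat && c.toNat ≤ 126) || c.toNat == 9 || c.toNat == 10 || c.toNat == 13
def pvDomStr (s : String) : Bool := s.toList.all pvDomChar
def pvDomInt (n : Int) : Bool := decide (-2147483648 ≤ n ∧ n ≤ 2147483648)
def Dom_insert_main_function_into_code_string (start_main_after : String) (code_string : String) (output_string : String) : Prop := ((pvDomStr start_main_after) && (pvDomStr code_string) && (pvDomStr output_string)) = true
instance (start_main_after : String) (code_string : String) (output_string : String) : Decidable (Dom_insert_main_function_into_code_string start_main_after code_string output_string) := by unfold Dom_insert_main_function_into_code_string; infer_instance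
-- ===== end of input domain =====

-- B replaces A's stateful flag loop with a find-index-then-slice decomposition (same behaviour, simpler shape).

-- ===== PORT A =====
-- literal port of A: split on "\n", one fold carrying (accumulated string, end_of_imports_found flag), then append tail
def insert_main_function_into_code_string (start_main_after : String) (code_string : String) (output_string : String) : String :=
  let code_lines := (PySem.Str.split? code_string "\n").getD []
  let st := code_lines.foldl
    (fun (p : String × Bool) line =>
      if !p.2 && PySem.Str.isIn start_main_after line then
        (p.1 ++ line ++ "\ndef main():\n", true)
      else if p.2 then
        (p.1 ++ "    " ++ line ++ "\n", p.2)
      else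
        (p.1 ++ line ++ "\n", p.2))
    ("", false)
  st.1 ++ output_string ++ "\nmain()\n"

-- ===== PORT B =====
-- literal port of Source B: find the first line containing start_main_after, join the prefix, indent the suffix
def insert_main_function_into_code_string_alt (start_main_after : String) (code_string : String) (output_string : String) : String :=
  let lines := (PySem.Str.split? code_string "\n").getD []
  let body :=
    match lines.findIdx? (fun l => PySem.Str.isIn start_main_after l) with
    | none => PySem.Str.join "\n" lines ++ "\n"
    | some idx =>
        PySem.Str.join "\n" (lines.take (idx + 1)) ++ "\ndef main():\n" ++
        PySem.Str.join "" ((lines.drop (idx + 1)).map (fun l => "    " ++ l ++ "\n"))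
  body ++ output_string ++ "\nmain()\n"

-- ===== PRECONDITION & SPEC =====
def Spec_insert_main_function_into_code_string (start_main_after : String) (code_string : String) (output_string : String) (out : String) : Prop := out = insert_main_function_into_code_string_alt start_main_after code_string output_string
instance (start_main_after : String) (code_string : String) (output_string : String) (out : String) : Decidable (Spec_insert_main_function_into_code_string start_main_after code_string output_string out) := by unfold Spec_insert_main_function_into_code_string; infer_instance

-- ===== CLAIM (what is proved, stated in full; the proofs are below) =====
def Claim_equal_insert_main_function_into_code_string : Prop := ∀ (start_main_after : String) (code_string : String) (output_string : String), Dom_insert_main_function_into_code_string start_main_after code_string output_string → Spec_insert_main_function_into_code_string start_main_after code_string output_string (insert_main_function_into_code_string start_main_after code_string output_string)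

-- ===== LEMMAS AND PROOFS =====

-- concatenation of lines, each followed by "\n" (what A's pre-match/no-match branches build)
def catN (M : List String) : String := PySem.Str.join "" (M.map (fun l => l ++ "\n"))
-- concatenation of indented lines (what A's post-match branch builds)
def catI (M : List String) : String := PySem.Str.join "" (M.map (fun l => "    " ++ l ++ "\n"))

theorem join_empty_nil : PySem.Str.join "" ([] : List String) = "" := by
  apply String.toList_inj.mp
  simp [PySem.Str.toList_join, PySem.Chars.join_nil]

theorem join_empty_cons (x : String) (xs : List String) :
    PySem.Str.join "" (x :: xs) = x ++ PySem.Str.join "" xs := by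
  apply String.toList_inj.mp
  cases xs with
  | nil => simp [PySem.Str.toList_join, PySem.Chars.join_nil]
  | cons q rest => simp [PySem.Str.toList_join, PySem.Chars.join_cons_cons]

theorem joinNL_cons (x : String) (xs : List String) (h : xs ≠ []) :
    PySem.Str.join "\n" (x :: xs) = x ++ "\n" ++ PySem.Str.join "\n" xs := by
  apply String.toList_inj.mp
  cases xs with
  | nil => exact absurd rfl h
  | cons q rest => simp [PySem.Str.toList_join, PySem.Chars.join_cons_cons]

theorem catN_nil : catN [] = "" := by simp [catN, join_empty_nil]
theorem catI_nil : catI [] = "" := by simp [catI, join_empty_nil]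

theorem catN_cons (x : String) (M : List String) : catN (x :: M) = x ++ "\n" ++ catN M := by
  simp [catN, join_empty_cons]

theorem catI_cons (x : String) (M : List String) :
    catI (x :: M) = "    " ++ x ++ "\n" ++ catI M := by
  simp [catI, join_empty_cons, String.append_assoc]

theorem joinNL_snoc (M : List String) (x : String) :
    PySem.Str.join "\n" (M ++ [x]) = catN M ++ x := by
  induction M with
  | nil =>
      apply String.toList_inj.mp
      simp [PySem.Str.toList_join, PySem.Chars.join_singleton, catN_nil]
  | cons m M ih =>
      rw [List.cons_append, joinNL_cons _ _ (by simp), ih, catN_cons]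
      simp [String.append_assoc]

theorem catN_eq_joinNL (M : List String) (h : M ≠ []) :
    catN M = PySem.Str.join "\n" M ++ "\n" := by
  rcases List.eq_nil_or_concat M with rfl | ⟨P, x, rfl⟩
  · exact absurd rfl h
  · rw [List.concat_eq_append, joinNL_snoc]
    induction P with
    | nil => simp [catN_cons, catN_nil]
    | cons p P ih =>
        rw [List.cons_append, catN_cons, catN_cons, ih (by simp)]
        simp [String.append_assoc]

theorem go_ne_nil (sep : List Char) : ∀ (fuel : Nat) (l cur : List Char) (acc : List (List Char)),
    PySem.Chars.splitOn.go sep fuel l cur acc ≠ [] := by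
  intro fuel
  induction fuel with
  | zero => intro l cur acc; simp [PySem.Chars.splitOn.go]
  | succ f ih =>
    intro l cur acc
    cases l with
    | nil => simp [PySem.Chars.splitOn.go]
    | cons c rest =>
      rw [PySem.Chars.splitOn.go]
      split_ifs with h
      · exact ih _ _ _
      · exact ih _ _ _

theorem split_nl_ne_nil (c : String) : (PySem.Str.split? c "\n").getD [] ≠ [] := by
  have h := PySem.Str.split?_map c "\n"
  cases hs : PySem.Str.split? c "\n" with
  | none =>
      rw [hs] at h
      simp [PySem.Chars.split?] at h
  | some M =>
      rw [hs] at h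
      simp only [Option.map_some, PySem.Chars.split?] at h
      rw [if_neg (by simp)] at h
      intro hM
      simp only [Option.getD_some] at hM
      subst hM
      simp only [List.map_nil] at h
      exact go_ne_nil _ _ _ _ _ (Option.some.injEq _ _ ▸ h.symm)

theorem loop_true (s : String) : ∀ (L : List String) (acc : String),
    L.foldl
      (fun (p : String × Bool) line =>
        if !p.2 && PySem.Str.isIn s line then
          (p.1 ++ line ++ "\ndef main():\n", true)
        else if p.2 then
          (p.1 ++ "    " ++ line ++ "\n", p.2)
        else
          (p.1 ++ line ++ "\n", p.2))
      (acc, true) = (acc ++ catI L, true) := by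
  intro L
  induction L with
  | nil => intro acc; simp [catI_nil]
  | cons l L ih =>
      intro acc
      simp only [List.foldl_cons, Bool.not_true, Bool.false_and, Bool.false_eq_true, if_false,
        if_true, ih, catI_cons]
      simp [String.append_assoc]

theorem loop_false (s : String) : ∀ (L : List String) (acc : String),
    L.foldl
      (fun (p : String × Bool) line =>
        if !p.2 && PySem.Str.isIn s line then
          (p.1 ++ line ++ "\ndef main():\n", true)
        else if p.2 then
          (p.1 ++ "    " ++ line ++ "\n", p.2)
        else
          (p.1 ++ line ++ "\n", p.2))
      (acc, false) =
    (match L.findIdx? (fun l => PySem.Str.isIn s l) with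
     | none => (acc ++ catN L, false)
     | some i => (acc ++ catN (L.take i) ++ L.getD i "" ++ "\ndef main():\n" ++ catI (L.drop (i + 1)), true)) := by
  intro L
  induction L with
  | nil => intro acc; simp [catN_nil]
  | cons x L ih =>
      intro acc
      simp only [List.foldl_cons, Bool.not_false, Bool.true_and]
      by_cases hx : PySem.Str.isIn s x = true
      · simp only [hx, if_true, List.findIdx?_cons, loop_true]
        simp [catN_nil, List.getD, catI]
      · simp only [hx, if_false, Bool.false_eq_true, ih, List.findIdx?_cons]
        cases hL : L.findIdx? (fun l => PySem.Str.isIn s l) with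
        | none => simp [catN_cons, String.append_assoc]
        | some j => simp [catN_cons, String.append_assoc, List.getD]

-- ===== VERDICT (by name: the statement is the Claim_ definition above) =====
theorem insert_main_function_into_code_string_spec : Claim_equal_insert_main_function_into_code_string := by
  intro s c o _
  unfold Spec_insert_main_function_into_code_string
  unfold insert_main_function_into_code_string insert_main_function_into_code_string_alt
  have hne := split_nl_ne_nil c
  set L := (PySem.Str.split? c "\n").getD [] with hL
  dsimp only
  rw [loop_false]
  cases hfi : L.findIdx? (fun l => PySem.Str.isIn s l) with
  | none =>
      dsimp only
      rw [catN_eq_joinNL L hne]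
      simp
  | some i =>
      have hi : i < L.length := by
        have := List.findIdx?_eq_some_iff_findIdx_eq.mp hfi
        omega
      dsimp only
      rw [List.take_succ_eq_append_getElem hi, joinNL_snoc, List.getD_eq_getElem L "" hi]
      show ("" ++ catN (L.take i) ++ L[i] ++ "\ndef main():\n" ++ catI (L.drop (i + 1))) ++ o ++ "\nmain()\n" = _
      simp [catI, String.append_assoc]
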